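-- pv_equiv track=rewrite | github.com/SatoMichi/Mahjong_in_Python | JudgeRon.py | qingyise
-- ===== SOURCE A (Python) =====
-- def qingyise(hand,openHand):
--     hand_no = pai2onlyno(hand)
--     openHand_no = pai2onlyno(openHand)
--     ron = [False,False,False]
--     qingyise = [0,1,2,3,4,5,6,7,8]
--     for i in range(3):
--         qingyisepai = [qys + 9*i for qys in qingyise]
--         if_ron = True
--         for oph in openHand_no:
--             for op in oph:
--                 if(not op in qingyisepai):
--                     if_ron = False
--         for ha in hand_no:
--             for h in ha:
--                 if(not h in qingyisepai):
--                     if_ron = False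
--         if(if_ron):
--             ron[i]= True
--     if(True in ron):
--         return True
--     return False
--
-- def pai2onlyno(hand):
--     honlyno = []
--     for h in hand:
--         if(len(h)==4):
--             new_h = [h[0][0],h[1][0],h[2][0],h[3][0]]
--         elif(len(h)==3):
--             new_h = [h[0][0],h[1][0],h[2][0]]
--         elif(len(h)==2):
--             new_h = [h[0][0],h[1][0]]
--         else:
--             new_h = [h[0][0]]
--         honlyno.append(new_h)
--     return honlyno
-- ===== SOURCE B (Python) =====
-- def qingyise(hand, openHand):
--     suits = {n // 9 for grp in pai2onlyno(openHand) + pai2onlyno(hand) for n in grp}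
--     if not suits:
--         return True
--     if len(suits) > 1:
--         return False
--     (s,) = suits
--     return s in (0, 1, 2)
--
-- def pai2onlyno(hand):
--     honlyno = []
--     for h in hand:
--         if(len(h)==4):
--             new_h = [h[0][0],h[1][0],h[2][0],h[3][0]]
--         elif(len(h)==3):
--             new_h = [h[0][0],h[1][0],h[2][0]]
--         elif(len(h)==2):
--             new_h = [h[0][0],h[1][0]]
--         else:
--             new_h = [h[0][0]]
--         honlyno.append(new_h)
--     return honlyno
-- ===== Notes on version B (the rewrite author's own statement) =====
-- stated objective: simpler
-- what changed: Instead of rescanning all tiles once per candidate suit (three passes, each testing membership in a 9-element list), B flattens the tile numbers once, maps each to its suit n//9, and decides from the resulting set: empty set -> True, one suit in {0,1,2} -> True, otherwise False.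
import Mathlib
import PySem

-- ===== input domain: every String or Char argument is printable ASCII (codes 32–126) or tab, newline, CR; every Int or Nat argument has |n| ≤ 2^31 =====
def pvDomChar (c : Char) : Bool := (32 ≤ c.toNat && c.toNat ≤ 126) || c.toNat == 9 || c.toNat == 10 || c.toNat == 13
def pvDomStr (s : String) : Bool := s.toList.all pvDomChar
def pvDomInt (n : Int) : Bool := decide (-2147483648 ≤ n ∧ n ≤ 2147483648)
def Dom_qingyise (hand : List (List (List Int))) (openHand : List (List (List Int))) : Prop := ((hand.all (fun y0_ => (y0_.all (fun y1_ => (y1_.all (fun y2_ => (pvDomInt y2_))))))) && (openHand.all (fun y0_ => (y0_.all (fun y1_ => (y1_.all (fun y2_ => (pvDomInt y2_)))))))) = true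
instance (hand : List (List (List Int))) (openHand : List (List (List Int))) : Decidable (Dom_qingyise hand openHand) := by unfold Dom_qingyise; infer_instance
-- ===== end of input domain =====

-- B replaces A's three per-suit rescans by one flattening pass into a set of suits n//9; simpler single-pass decision.

-- ===== PORT A =====
-- h[i][0]; exact wherever Python does not raise IndexError (Pre_ excludes the raising inputs)
def pvTile0 (h : List (List Int)) (i : Nat) : Int := (h.getD i []).headD 0

def pai2onlyno (hand : List (List (List Int))) : List (List Int) :=
  hand.foldl (fun honlyno h =>
    let new_h :=
      if h.length = 4 then [pvTile0 h 0, pvTile0 h 1, pvTile0 h 2, pvTile0 h 3]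
      else if h.length = 3 then [pvTile0 h 0, pvTile0 h 1, pvTile0 h 2]
      else if h.length = 2 then [pvTile0 h 0, pvTile0 h 1]
      else [pvTile0 h 0]
    honlyno ++ [new_h]) []

def qingyise (hand : List (List (List Int))) (openHand : List (List (List Int))) : Bool :=
  let hand_no := pai2onlyno hand
  let openHand_no := pai2onlyno openHand
  let ron := (PySem.List.pyRange 0 3 1).foldl (fun ron i =>
    let qingyisepai := ([0,1,2,3,4,5,6,7,8] : List Int).map (fun qys => qys + 9*i)
    let if_ron := true
    let if_ron := openHand_no.foldl (fun b oph =>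
      oph.foldl (fun b op => if ¬ (op ∈ qingyisepai) then false else b) b) if_ron
    let if_ron := hand_no.foldl (fun b ha =>
      ha.foldl (fun b h => if ¬ (h ∈ qingyisepai) then false else b) b) if_ron
    if if_ron then ron.set i.toNat true else ron) [false, false, false]
  if true ∈ ron then true else false

-- ===== PORT B =====
def qingyise_alt (hand : List (List (List Int))) (openHand : List (List (List Int))) : Bool :=
  let suits : PySem.Set Int :=
    PySem.Set.ofList ((pai2onlyno openHand ++ pai2onlyno hand).flatMap
      (fun grp => grp.map (fun n => PySem.Int.floordiv n 9)))
  if suits.isEmpty then true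
  else if 1 < suits.length then false
  else decide (suits.headD 0 ∈ ([0,1,2] : List Int))

-- ===== PRECONDITION & SPEC =====
-- the group positions pai2onlyno actually reads: first len(g) tiles when len ∈ {2,3,4}, else only the first
def pvGroupOK (g : List (List Int)) : Bool :=
  !g.isEmpty && (g.take (if 2 ≤ g.length ∧ g.length ≤ 4 then g.length else 1)).all (fun t => !t.isEmpty)

-- Pre_ excludes exactly the inputs on which Python's pai2onlyno raises IndexError (an empty
-- group, or an empty tile list at a position it reads); A returns on everything else.
def Pre_qingyise (hand : List (List (List Int))) (openHand : List (List (List Int))) : Prop :=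
  hand.all pvGroupOK = true ∧ openHand.all pvGroupOK = true

instance (hand : List (List (List Int))) (openHand : List (List (List Int))) : Decidable (Pre_qingyise hand openHand) := by unfold Pre_qingyise; infer_instance

def pvWitness_qingyise : List (List (List Int)) × List (List (List Int)) :=
  ([[[1],[2],[3]], [[4],[4]]], [[[7],[8],[9]]])

def Spec_qingyise (hand : List (List (List Int))) (openHand : List (List (List Int))) (out : Bool) : Prop := out = qingyise_alt hand openHand
instance (hand : List (List (List Int))) (openHand : List (List (List Int))) (out : Bool) : Decidable (Spec_qingyise hand openHand out) := by unfold Spec_qingyise; infer_instance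

-- ===== CLAIM (what is proved, stated in full; the proofs are below) =====
def Claim_equal_qingyise : Prop := ∀ (hand : List (List (List Int))) (openHand : List (List (List Int))), Dom_qingyise hand openHand → Pre_qingyise hand openHand → Spec_qingyise hand openHand (qingyise hand openHand)

-- ===== LEMMAS AND PROOFS =====

-- the suit test A runs for candidate suit i, over the flattened tile numbers
def pvAllSuit (nums : List Int) (i : Int) : Bool :=
  nums.all (fun n => decide (PySem.Int.floordiv n 9 = i))

def pvNums (hand openHand : List (List (List Int))) : List Int :=
  (pai2onlyno openHand ++ pai2onlyno hand).flatMap (fun g => g)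

-- A's bool-accumulating inner loop is an 'all'
lemma foldl_if_mem (pai : List Int) (l : List Int) (b : Bool) :
    l.foldl (fun b op => if ¬ (op ∈ pai) then false else b) b
      = (b && l.all (fun x => decide (x ∈ pai))) := by
  induction l generalizing b with
  | nil => simp
  | cons x l ih =>
      simp only [List.foldl_cons, List.all_cons, ih]
      by_cases hx : x ∈ pai <;> simp [hx]

lemma foldl_foldl_if_mem (pai : List Int) (L : List (List Int)) (b : Bool) :
    L.foldl (fun b g => g.foldl (fun b op => if ¬ (op ∈ pai) then false else b) b) b
      = (b && L.all (fun g => g.all (fun x => decide (x ∈ pai)))) := by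
  induction L generalizing b with
  | nil => simp
  | cons g L ih =>
      rw [List.foldl_cons, foldl_if_mem, ih, List.all_cons, Bool.and_assoc]

lemma mem_pai_iff (n i : Int) :
    n ∈ ([0,1,2,3,4,5,6,7,8] : List Int).map (fun qys => qys + 9*i)
      ↔ PySem.Int.floordiv n 9 = i := by
  rw [PySem.Int.floordiv_eq_iff_of_pos (by norm_num)]
  simp only [List.map, List.mem_cons, List.not_mem_nil, or_false]
  omega

lemma lists_all_eq (L1 L2 : List (List Int)) (p : Int → Bool) :
    (L1.all (fun g => g.all p) && L2.all (fun g => g.all p))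
      = ((L1 ++ L2).flatMap (fun g => g)).all p := by
  simp [List.all_append]

lemma qingyise_eq_allSuit (hand openHand : List (List (List Int))) :
    qingyise hand openHand
      = (pvAllSuit (pvNums hand openHand) 0 || pvAllSuit (pvNums hand openHand) 1
          || pvAllSuit (pvNums hand openHand) 2) := by
  have hr : PySem.List.pyRange 0 3 1 = [0, 1, 2] := by decide
  unfold qingyise
  rw [hr]
  simp only [List.foldl_cons, List.foldl_nil, foldl_foldl_if_mem, Bool.true_and]
  have key : ∀ i : Int,
      ((pai2onlyno openHand).all (fun g => g.all (fun x =>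
          decide (x ∈ ([0,1,2,3,4,5,6,7,8] : List Int).map (fun qys => qys + 9*i)))) &&
      (pai2onlyno hand).all (fun g => g.all (fun x =>
          decide (x ∈ ([0,1,2,3,4,5,6,7,8] : List Int).map (fun qys => qys + 9*i)))))
        = pvAllSuit (pvNums hand openHand) i := by
    intro i
    unfold pvAllSuit pvNums
    rw [← lists_all_eq]
    simp only [mem_pai_iff]
  rw [key 0, key 1, key 2]
  cases h0 : pvAllSuit (pvNums hand openHand) 0 <;>
  cases h1 : pvAllSuit (pvNums hand openHand) 1 <;>
  cases h2 : pvAllSuit (pvNums hand openHand) 2 <;> simp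

lemma qingyise_alt_eq (hand openHand : List (List (List Int))) :
    qingyise_alt hand openHand
      = (if (PySem.Set.ofList ((pvNums hand openHand).map (fun n => PySem.Int.floordiv n 9))).isEmpty then true
         else if 1 < (PySem.Set.ofList ((pvNums hand openHand).map (fun n => PySem.Int.floordiv n 9))).length then false
         else decide ((PySem.Set.ofList ((pvNums hand openHand).map (fun n => PySem.Int.floordiv n 9))).headD 0 ∈ ([0,1,2] : List Int))) := by
  unfold qingyise_alt pvNums
  rw [← List.map_flatMap]

-- ofList of a nonempty constant list is the singleton
lemma ofList_const (a : Int) (l : List Int) (h : ∀ x ∈ l, x = a) (hne : l ≠ []) :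
    PySem.Set.ofList l = [a] := by
  cases l with
  | nil => exact absurd rfl hne
  | cons x l =>
      have hx : x = a := h x (List.mem_cons_self)
      subst hx
      have step : PySem.Set.ofList (x :: l) = l.foldl PySem.Set.add [x] := by
        rw [PySem.Set.ofList_eq_foldl]; rfl
      rw [step]
      have hall : ∀ y ∈ l, y = x := fun y hy => h y (List.mem_cons_of_mem _ hy)
      clear step h hne
      induction l with
      | nil => rfl
      | cons y l ih =>
          have hy : y = x := hall y List.mem_cons_self
          subst hy
          have hadd : PySem.Set.add [y] y = [y] := by
            simp [PySem.Set.add, PySem.Set.contains]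
          simp only [List.foldl_cons, hadd]
          exact ih (fun z hz => hall z (List.mem_cons_of_mem _ hz))

lemma exists_suit_of_A (nums : List Int)
    (hA : (pvAllSuit nums 0 || pvAllSuit nums 1 || pvAllSuit nums 2) = true) :
    ∃ i : Int, i ∈ ([0,1,2] : List Int) ∧ pvAllSuit nums i = true := by
  rcases Bool.or_eq_true_iff.mp hA with h | h2
  · rcases Bool.or_eq_true_iff.mp h with h0 | h1
    · exact ⟨0, by simp, h0⟩
    · exact ⟨1, by simp, h1⟩
  · exact ⟨2, by simp, h2⟩

lemma main_eq (hand openHand : List (List (List Int))) :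
    qingyise hand openHand = qingyise_alt hand openHand := by
  rw [qingyise_eq_allSuit, qingyise_alt_eq]
  generalize pvNums hand openHand = nums
  rcases hn : nums with _ | ⟨n0, rest⟩
  · simp [pvAllSuit, PySem.Set.ofList]
  · subst hn
    have hmem : ∀ x : Int,
        x ∈ PySem.Set.ofList ((n0 :: rest).map (fun n => PySem.Int.floordiv n 9))
          ↔ x ∈ (n0 :: rest).map (fun n => PySem.Int.floordiv n 9) := fun x =>
      PySem.Set.mem_ofList _ _
    cases hofl : PySem.Set.ofList ((n0 :: rest).map (fun n => PySem.Int.floordiv n 9)) with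
    | nil =>
        exfalso
        have h0 : PySem.Int.floordiv n0 9
            ∈ PySem.Set.ofList ((n0 :: rest).map (fun n => PySem.Int.floordiv n 9)) :=
          (hmem _).mpr (by simp)
        rw [hofl] at h0
        simp at h0
    | cons a t =>
        cases t with
        | cons b u =>
            rw [if_neg (by simp), if_pos (by simp)]
            cases hA : (pvAllSuit (n0 :: rest) 0 || pvAllSuit (n0 :: rest) 1
                || pvAllSuit (n0 :: rest) 2) with
            | false => rfl
            | true =>
                exfalso
                obtain ⟨i, _, hall⟩ := exists_suit_of_A _ hA
                have hconst : ∀ x ∈ (n0 :: rest).map (fun n => PySem.Int.floordiv n 9), x = i := by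
                  intro x hx
                  rcases List.mem_map.mp hx with ⟨n, hnmem, rfl⟩
                  exact of_decide_eq_true (List.all_eq_true.mp hall n hnmem)
                have hsing := ofList_const i _ hconst (by simp)
                rw [hofl] at hsing
                simp at hsing
        | nil =>
            rw [if_neg (by simp), if_neg (by simp), List.headD_cons]
            rw [Bool.eq_iff_iff]
            constructor
            · intro hA
              obtain ⟨i, hi, hall⟩ := exists_suit_of_A _ hA
              have hconst : ∀ x ∈ (n0 :: rest).map (fun n => PySem.Int.floordiv n 9), x = i := by
                intro x hx
                rcases List.mem_map.mp hx with ⟨n, hnmem, rfl⟩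
                exact of_decide_eq_true (List.all_eq_true.mp hall n hnmem)
              have hsing := ofList_const i _ hconst (by simp)
              rw [hofl] at hsing
              have ha : a = i := by simpa using hsing
              subst ha
              exact decide_eq_true hi
            · intro hB
              have ha : a ∈ ([0,1,2] : List Int) := of_decide_eq_true hB
              have hall : pvAllSuit (n0 :: rest) a = true := by
                unfold pvAllSuit
                rw [List.all_eq_true]
                intro n hnmem
                have h1 : PySem.Int.floordiv n 9
                    ∈ PySem.Set.ofList ((n0 :: rest).map (fun n => PySem.Int.floordiv n 9)) :=
                  (hmem _).mpr (List.mem_map_of_mem hnmem)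
                rw [hofl] at h1
                have : PySem.Int.floordiv n 9 = a := by simpa using h1
                exact decide_eq_true this
              have ha' : a = 0 ∨ a = 1 ∨ a = 2 := by simpa using ha
              rcases ha' with rfl | rfl | rfl <;> simp [hall]

-- ===== VERDICT (by name: the statement is the Claim_ definition above) =====
theorem qingyise_spec : Claim_equal_qingyise := by
  intro hand openHand _ _
  unfold Spec_qingyise
  exact main_eq hand openHand
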